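-- pv_equiv track=rewrite | github.com/Karolon/Python-3 | informatyka-2024-maj-matura-rozszerzona-zalaczniki/zad3.py | NieparzystySkrot
-- ===== SOURCE A (Python) =====
-- def NieparzystySkrot(n):
--     m = 0
--     b = 1
--     while n > 0:
--         a = n % 10
--         n //= 10
--         if a % 2 != 0:
--             m+= b * a
--             b *= 10
--     if m == 0:
--         return 0
--     return m
-- ===== SOURCE B (Python) =====
-- def NieparzystySkrot(n):
--     if n <= 0:
--         return 0
--     r = NieparzystySkrot(n // 10)
--     a = n % 10
--     return r * 10 + a if a % 2 != 0 else r
-- ===== Notes on version B (the rewrite author's own statement) =====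
-- stated objective: simpler
-- what changed: Replaces A's iterative least-significant-first accumulation with an explicit place-value multiplier by a top-down recursion that appends each odd digit to the recursively built prefix, needing no multiplier state and no final zero check.
import Mathlib
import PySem

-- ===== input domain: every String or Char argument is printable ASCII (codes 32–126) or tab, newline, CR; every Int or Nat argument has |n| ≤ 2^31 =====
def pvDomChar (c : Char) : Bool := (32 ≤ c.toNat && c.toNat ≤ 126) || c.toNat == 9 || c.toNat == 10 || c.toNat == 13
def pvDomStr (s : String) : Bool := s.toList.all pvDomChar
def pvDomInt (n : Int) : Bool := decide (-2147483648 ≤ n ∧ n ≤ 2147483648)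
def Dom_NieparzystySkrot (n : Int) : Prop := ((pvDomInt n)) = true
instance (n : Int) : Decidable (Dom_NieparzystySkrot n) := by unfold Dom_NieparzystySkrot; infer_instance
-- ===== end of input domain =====

-- B replaces A's iterative least-significant-first accumulation (multiplier b) by a
-- top-down recursion rec of the quotient, times ten, plus digit; a simpler decomposition, same cost.


-- termination helper for both ports: n // 10 shrinks while n > 0
theorem pvDiv10_lt (n : Int) (h : 0 < n) : (PySem.Int.floordiv n 10).toNat < n.toNat := by
  rw [PySem.Int.floordiv_eq_ediv_of_pos (by norm_num)]
  have h3 : 0 ≤ n / 10 := Int.ediv_nonneg (le_of_lt h) (by norm_num)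
  have h2 : n / 10 < n := by
    have := Int.ediv_mul_le n (b := 10) (by omega)
    omega
  omega

-- ===== PORT A =====
-- the while loop of A, state (n, m, b)
def pvLoopA (n m b : Int) : Int :=
  if h : n > 0 then
    let a := PySem.Int.mod n 10
    if PySem.Int.mod a 2 ≠ 0 then
      pvLoopA (PySem.Int.floordiv n 10) (m + b * a) (b * 10)
    else
      pvLoopA (PySem.Int.floordiv n 10) m b
  else m
termination_by n.toNat
decreasing_by all_goals exact pvDiv10_lt n h

def NieparzystySkrot (n : Int) : Int :=
  let m := pvLoopA n 0 1
  if m = 0 then 0 else m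

-- ===== PORT B =====
def NieparzystySkrot_alt (n : Int) : Int :=
  if h : n ≤ 0 then 0
  else
    let r := NieparzystySkrot_alt (PySem.Int.floordiv n 10)
    let a := PySem.Int.mod n 10
    if PySem.Int.mod a 2 ≠ 0 then r * 10 + a else r
termination_by n.toNat
decreasing_by exact pvDiv10_lt n (by omega)

-- ===== PRECONDITION & SPEC =====
def Spec_NieparzystySkrot (n : Int) (out : Int) : Prop := out = NieparzystySkrot_alt n
instance (n : Int) (out : Int) : Decidable (Spec_NieparzystySkrot n out) := by unfold Spec_NieparzystySkrot; infer_instance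

-- ===== CLAIM (what is proved, stated in full; the proofs are below) =====
def Claim_equal_NieparzystySkrot : Prop := ∀ (n : Int), Dom_NieparzystySkrot n → Spec_NieparzystySkrot n (NieparzystySkrot n)

-- ===== LEMMAS AND PROOFS =====
-- loop invariant: A's loop from state (m, b) adds b times B's value of n
theorem pvLoopA_eq (k : Nat) : ∀ n m b : Int, n.toNat = k →
    pvLoopA n m b = m + b * NieparzystySkrot_alt n := by
  induction k using Nat.strong_induction_on with
  | _ k ih =>
    intro n m b hk
    rw [pvLoopA, NieparzystySkrot_alt]
    by_cases h : 0 < n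
    · have hlt := pvDiv10_lt n h
      have ihm := ih _ (hk ▸ hlt) (PySem.Int.floordiv n 10)
      rw [dif_pos h, dif_neg (by omega)]
      by_cases hodd : PySem.Int.mod (PySem.Int.mod n 10) 2 ≠ 0
      · rw [if_pos hodd, if_pos hodd, ihm _ _ rfl]; ring
      · rw [if_neg hodd, if_neg hodd, ihm _ _ rfl]
    · rw [dif_neg h, dif_pos (by omega)]; ring

-- ===== VERDICT (by name: the statement is the Claim_ definition above) =====
theorem NieparzystySkrot_spec : Claim_equal_NieparzystySkrot := by
  intro n _
  unfold Spec_NieparzystySkrot NieparzystySkrot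
  have h := pvLoopA_eq n.toNat n 0 1 rfl
  simp only [zero_add, one_mul] at h
  rw [h]
  by_cases hz : NieparzystySkrot_alt n = 0
  · simp [hz]
  · simp [hz]
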